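-- pv_equiv track=rewrite | github.com/reahl/swordfish | src/reahl/swordfish/gemstone/browser.py | trimmed_code_range
-- ===== SOURCE A (Python) =====
-- def trimmed_code_range(
--
--     source,
--     code_character_map,
--     raw_start_offset,
--     raw_end_offset,
-- ):
--     start_offset = raw_start_offset
--     end_offset = raw_end_offset
--     while (
--         start_offset < end_offset
--         and (
--             not code_character_map[start_offset]
--             or source[start_offset].isspace()
--         )
--     ):
--         start_offset = start_offset + 1
--     while (
--         end_offset > start_offset
--         and (
--             not code_character_map[end_offset - 1]
--             or source[end_offset - 1].isspace()
--         )
--     ):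
--         end_offset = end_offset - 1
--     if start_offset >= end_offset:
--         return None, None
--     return start_offset, end_offset
-- ===== SOURCE B (Python) =====
-- def trimmed_code_range(
--     source,
--     code_character_map,
--     raw_start_offset,
--     raw_end_offset,
-- ):
--     code_positions = [
--         i
--         for i in range(raw_start_offset, raw_end_offset)
--         if code_character_map[i] and not source[i].isspace()
--     ]
--     if not code_positions:
--         return None, None
--     return code_positions[0], code_positions[-1] + 1
-- ===== Notes on version B (the rewrite author's own statement) =====
-- stated objective: simpler
-- what changed: Replaces A's two directional early-stopping pointer scans with a single build-then-select pass: collect every code position in the range, then read off the first position and the last position plus one.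
-- outside the precondition, e.g. on trimmed_code_range('a', [True, False, False], 0, 3): A returns (0, 1), B returns (0, 1); on trimmed_code_range(' a', [True, True], -1, 2): A returns (-1, 2), B returns (-1, 2)
import Mathlib
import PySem

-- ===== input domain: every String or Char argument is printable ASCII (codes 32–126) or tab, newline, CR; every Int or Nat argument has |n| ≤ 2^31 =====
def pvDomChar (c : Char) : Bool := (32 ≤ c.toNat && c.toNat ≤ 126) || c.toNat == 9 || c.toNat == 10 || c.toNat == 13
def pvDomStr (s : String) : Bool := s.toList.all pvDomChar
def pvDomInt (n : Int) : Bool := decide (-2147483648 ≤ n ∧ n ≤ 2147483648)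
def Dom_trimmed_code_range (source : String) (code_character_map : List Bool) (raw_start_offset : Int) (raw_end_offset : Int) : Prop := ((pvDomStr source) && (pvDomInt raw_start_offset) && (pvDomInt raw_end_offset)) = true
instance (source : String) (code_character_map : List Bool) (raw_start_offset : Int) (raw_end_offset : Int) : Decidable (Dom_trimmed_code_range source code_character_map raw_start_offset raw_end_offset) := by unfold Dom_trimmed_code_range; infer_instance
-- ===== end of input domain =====

-- B replaces A's two directional early-stopping scans with one build-then-select pass
-- (collect all code positions, take first and last+1); objective: simpler. Equal wherever A returns.


-- ===== PORT A =====
-- 'not code_character_map[i] or source[i].isspace()' — the loop-continue condition of both while loops.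
-- pyGet? = none is Python's IndexError; totalized with getD (Pre_ excludes those inputs).
def pvCondA (source : String) (code_character_map : List Bool) (i : Int) : Bool :=
  !((PySem.List.pyGet? code_character_map i).getD false)
    || PySem.Chars.isspace ((PySem.List.pyGet? source.toList i).getD ' ')

-- first while loop: advance start_offset while the condition holds
def pvScanUp (source : String) (code_character_map : List Bool) (e : Int) (s : Int) : Int :=
  if h : s < e ∧ pvCondA source code_character_map s then
    pvScanUp source code_character_map e (s + 1)
  else s
termination_by (e - s).toNat
decreasing_by omega

-- second while loop: retreat end_offset while the condition holds at end_offset - 1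
def pvScanDown (source : String) (code_character_map : List Bool) (s : Int) (e : Int) : Int :=
  if h : e > s ∧ pvCondA source code_character_map (e - 1) then
    pvScanDown source code_character_map s (e - 1)
  else e
termination_by (e - s).toNat
decreasing_by omega

def trimmed_code_range (source : String) (code_character_map : List Bool) (raw_start_offset : Int) (raw_end_offset : Int) : Option Int × Option Int :=
  let start_offset := pvScanUp source code_character_map raw_end_offset raw_start_offset
  let end_offset := pvScanDown source code_character_map start_offset raw_end_offset
  if start_offset ≥ end_offset then (none, none)
  else (some start_offset, some end_offset)

-- ===== PORT B =====
-- 'code_character_map[i] and not source[i].isspace()' — the comprehension's filter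
def pvGood (source : String) (code_character_map : List Bool) (i : Int) : Bool :=
  ((PySem.List.pyGet? code_character_map i).getD false)
    && !(PySem.Chars.isspace ((PySem.List.pyGet? source.toList i).getD ' '))

def trimmed_code_range_alt (source : String) (code_character_map : List Bool) (raw_start_offset : Int) (raw_end_offset : Int) : Option Int × Option Int :=
  let code_positions :=
    (PySem.List.pyRange raw_start_offset raw_end_offset 1).filter
      (pvGood source code_character_map)
  match code_positions.head?, code_positions.getLast? with
  | some a, some b => (some a, some (b + 1))
  | _, _ => (none, none)

-- ===== PRECONDITION & SPEC =====
-- Pre_ keeps the offsets inside a valid nonnegative subrange of both source and the map (or an empty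
-- range), so no subscript can raise IndexError; it also excludes some inputs on which A still returns —
-- ranges reaching outside [0, len) where negative-index wraparound or False map entries beyond the
-- shorter sequence happen to let Python return anyway (see claim cites; B returns the same values there).
def Pre_trimmed_code_range (source : String) (code_character_map : List Bool) (raw_start_offset : Int) (raw_end_offset : Int) : Prop :=
  raw_end_offset ≤ raw_start_offset ∨
    (0 ≤ raw_start_offset ∧ raw_end_offset ≤ (source.length : Int) ∧
      raw_end_offset ≤ (code_character_map.length : Int))
instance (source : String) (code_character_map : List Bool) (raw_start_offset : Int) (raw_end_offset : Int) : Decidable (Pre_trimmed_code_range source code_character_map raw_start_offset raw_end_offset) := by unfold Pre_trimmed_code_range; infer_instance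

def pvWitness_trimmed_code_range : String × List Bool × Int × Int := (" ab ", [true, true, true, false], 0, 4)

def Spec_trimmed_code_range (source : String) (code_character_map : List Bool) (raw_start_offset : Int) (raw_end_offset : Int) (out : Option Int × Option Int) : Prop := out = trimmed_code_range_alt source code_character_map raw_start_offset raw_end_offset
instance (source : String) (code_character_map : List Bool) (raw_start_offset : Int) (raw_end_offset : Int) (out : Option Int × Option Int) : Decidable (Spec_trimmed_code_range source code_character_map raw_start_offset raw_end_offset out) := by unfold Spec_trimmed_code_range; infer_instance

-- ===== CLAIM (what is proved, stated in full; the proofs are below) =====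
def Claim_equal_trimmed_code_range : Prop := ∀ (source : String) (code_character_map : List Bool) (raw_start_offset : Int) (raw_end_offset : Int), Dom_trimmed_code_range source code_character_map raw_start_offset raw_end_offset → Pre_trimmed_code_range source code_character_map raw_start_offset raw_end_offset → Spec_trimmed_code_range source code_character_map raw_start_offset raw_end_offset (trimmed_code_range source code_character_map raw_start_offset raw_end_offset)

-- ===== LEMMAS AND PROOFS =====

-- A's loop condition is the negation of B's filter predicate (De Morgan on the totalized accesses)
theorem pvCondA_eq_not_good (source : String) (m : List Bool) (i : Int) :
    pvCondA source m i = !pvGood source m i := by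
  simp [pvCondA, pvGood]

-- invariant of the first scan: it only skips non-good indices, never passes e, and stops at a good index or at e
theorem pvScanUp_props (source : String) (m : List Bool) (e : Int) :
    ∀ (n : Nat) (s : Int), (e - s).toNat ≤ n →
      s ≤ pvScanUp source m e s ∧
      (pvScanUp source m e s ≤ e ∨ pvScanUp source m e s = s) ∧
      (pvScanUp source m e s < e → pvGood source m (pvScanUp source m e s) = true) ∧
      (PySem.List.pyRange s e 1).filter (pvGood source m)
        = (PySem.List.pyRange (pvScanUp source m e s) e 1).filter (pvGood source m) := by
  intro n
  induction n with
  | zero =>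
    intro s hs
    have he : ¬ (s < e) := by omega
    rw [pvScanUp]
    simp [he]
  | succ k ih =>
    intro s hs
    rw [pvScanUp]
    by_cases h : s < e ∧ pvCondA source m s = true
    · have hlt : s < e := h.1
      have hnotgood : pvGood source m s = false := by
        have := h.2
        rw [pvCondA_eq_not_good] at this
        simpa using this
      have ihs := ih (s + 1) (by omega)
      simp only [h, and_self, dif_pos]
      refine ⟨by omega, ?_, ihs.2.2.1, ?_⟩
      · rcases ihs.2.1 with h' | h'
        · exact Or.inl h'
        · left; omega
      · rw [PySem.List.pyRange_one_cons hlt, List.filter_cons_of_neg (by simp [hnotgood])]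
        exact ihs.2.2.2
    · rw [dif_neg h]
      refine ⟨le_refl _, Or.inr rfl, ?_, rfl⟩
      intro hlt
      have hc : pvCondA source m s = false := by
        cases hc' : pvCondA source m s
        · rfl
        · exact absurd ⟨hlt, hc'⟩ h
      rw [pvCondA_eq_not_good] at hc
      simpa using hc

-- invariant of the second scan: it only drops non-good top indices, stops at a good index or at s
theorem pvScanDown_props (source : String) (m : List Bool) (s : Int) :
    ∀ (n : Nat) (e : Int), (e - s).toNat ≤ n →
      pvScanDown source m s e ≤ e ∧
      (s ≤ pvScanDown source m s e ∨ pvScanDown source m s e = e) ∧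
      (s < pvScanDown source m s e → pvGood source m (pvScanDown source m s e - 1) = true) ∧
      (PySem.List.pyRange s e 1).filter (pvGood source m)
        = (PySem.List.pyRange s (pvScanDown source m s e) 1).filter (pvGood source m) := by
  intro n
  induction n with
  | zero =>
    intro e he
    have h : ¬ (e > s) := by omega
    rw [pvScanDown]
    simp [h]
  | succ k ih =>
    intro e he
    rw [pvScanDown]
    by_cases h : e > s ∧ pvCondA source m (e - 1) = true
    · have hlt : s < e := h.1
      have hnotgood : pvGood source m (e - 1) = false := by
        have := h.2
        rw [pvCondA_eq_not_good] at this
        simpa using this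
      have ihe := ih (e - 1) (by omega)
      simp only [h, and_self, dif_pos]
      refine ⟨by omega, ?_, ihe.2.2.1, ?_⟩
      · rcases ihe.2.1 with h' | h'
        · exact Or.inl h'
        · left; omega
      · have hsplit : PySem.List.pyRange s e 1
            = PySem.List.pyRange s (e - 1) 1 ++ [e - 1] := by
          have := PySem.List.pyRange_one_succ_right (a := s) (b := e - 1) (by omega)
          simpa [sub_add_cancel] using this
        rw [hsplit, List.filter_append]
        simp [hnotgood, ihe.2.2.2]
    · rw [dif_neg h]
      refine ⟨le_refl _, Or.inr rfl, ?_, rfl⟩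
      intro hlt
      have hc : pvCondA source m (e - 1) = false := by
        cases hc' : pvCondA source m (e - 1)
        · rfl
        · exact absurd ⟨hlt, hc'⟩ h
      rw [pvCondA_eq_not_good] at hc
      simpa using hc

-- ===== VERDICT (by name: the statement is the Claim_ definition above) =====
theorem trimmed_code_range_spec : Claim_equal_trimmed_code_range := by
  intro source m rs re _hDom _hPre
  unfold Spec_trimmed_code_range
  set s' := pvScanUp source m re rs with hs'
  set e' := pvScanDown source m s' re with he'
  obtain ⟨hup_le, hup_bound, hup_good, hup_filter⟩ :=
    pvScanUp_props source m re (re - rs).toNat rs (le_refl _)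
  obtain ⟨hdn_le, hdn_bound, hdn_good, hdn_filter⟩ :=
    pvScanDown_props source m s' (re - s').toNat re (le_refl _)
  rw [← hs'] at hup_le hup_bound hup_good hup_filter
  rw [← he'] at hdn_le hdn_bound hdn_good hdn_filter
  have hA : trimmed_code_range source m rs re
      = if s' ≥ e' then ((none : Option Int), (none : Option Int)) else (some s', some e') := by
    unfold trimmed_code_range
    rfl
  rw [hA]
  by_cases hcase : s' ≥ e'
  · -- A returns (none, none); the filtered range must be empty
    have hempty : (PySem.List.pyRange rs re 1).filter (pvGood source m) = [] := by
      rcases hdn_bound with h | h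
      · have : s' = e' := by omega
        rw [hup_filter, hdn_filter, ← this, PySem.List.pyRange_one_eq_nil (by omega)]
        simp
      · rw [hup_filter, PySem.List.pyRange_one_eq_nil (by omega)]
        simp
    simp only [trimmed_code_range_alt]
    simp [hcase, hempty]
  · -- A returns (some s', some e'); s' < e'
    push_neg at hcase
    have hgood_s : pvGood source m s' = true := hup_good (by omega)
    have hgood_e : pvGood source m (e' - 1) = true := hdn_good hcase
    have hfilter : (PySem.List.pyRange rs re 1).filter (pvGood source m)
        = (PySem.List.pyRange s' e' 1).filter (pvGood source m) := by
      rw [hup_filter, hdn_filter]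
    have hhead : ((PySem.List.pyRange rs re 1).filter (pvGood source m)).head? = some s' := by
      rw [hfilter, PySem.List.pyRange_one_cons hcase, List.filter_cons_of_pos (by simp [hgood_s])]
      rfl
    have hlast : ((PySem.List.pyRange rs re 1).filter (pvGood source m)).getLast? = some (e' - 1) := by
      have hsplit : PySem.List.pyRange s' e' 1
          = PySem.List.pyRange s' (e' - 1) 1 ++ [e' - 1] := by
        have := PySem.List.pyRange_one_succ_right (a := s') (b := e' - 1) (by omega)
        simpa [sub_add_cancel] using this
      rw [hfilter, hsplit, List.filter_append]
      simp [hgood_e]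
    have he1 : e' - 1 + 1 = e' := by ring
    have hne : ¬ s' ≥ e' := by omega
    simp only [trimmed_code_range_alt]
    simp [hne, hhead, hlast, he1]
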